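-- pv_equiv track=rewrite | github.com/CDCgov/NEDSS-DataReporting | utilities/local-db-tracing/generate_rdb_selects.py | extract_declare_block
-- ===== SOURCE A (Python) =====
-- def extract_declare_block(sql_text: str) -> list[str]:
--     lines = sql_text.splitlines()
--     has_reconstructed_heading = any(line.strip() == "Reconstructed SQL:" for line in lines)
--     in_reconstructed_sql = not has_reconstructed_heading
--     collected: list[str] = []
--     previous_was_declare = False
--
--     for line in lines:
--         if not in_reconstructed_sql:
--             if line.strip() == "Reconstructed SQL:":
--                 in_reconstructed_sql = True
--             continue
--
--         stripped = line.strip()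
--         if stripped.startswith("USE ") or not stripped:
--             previous_was_declare = False
--             continue
--         if stripped.startswith("DECLARE "):
--             collected.append(line)
--             previous_was_declare = True
--             continue
--         if stripped.startswith("-- Adjust the UID declarations below manually"):
--             if collected and not previous_was_declare and collected[-1] != "":
--                 collected.append("")
--             collected.append(line)
--             previous_was_declare = False
--             continue
--         previous_was_declare = False
--
--     return collected
-- ===== SOURCE B (Python) =====
-- def extract_declare_block(sql_text: str) -> list[str]:
--     lines = sql_text.splitlines()
--     strips = [l.strip() for l in lines]
--     start = strips.index("Reconstructed SQL:") + 1 if "Reconstructed SQL:" in strips else 0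
--     section = lines[start:]
--     # pair each section line with the stripped previous line ("" for the first):
--     # the look-back replaces A's previous_was_declare flag
--     pairs = list(zip(section, [""] + strips[start:]))
--     out: list[str] = []
--     for line, prev in pairs:
--         s = line.strip()
--         if s.startswith("DECLARE "):
--             out.append(line)
--         elif s.startswith("-- Adjust the UID declarations below manually"):
--             if out and not prev.startswith("DECLARE ") and out[-1] != "":
--                 out.append("")
--             out.append(line)
--     return out
-- ===== Notes on version B (the rewrite author's own statement) =====
-- stated objective: alternative
-- what changed: Replaces A's two mutable flags (in_reconstructed_sql and previous_was_declare) with a flag-free pass: pre-strip all lines, slice the section at the first heading via index, zip each line with its predecessor's stripped value as a look-back, and emit only DECLARE and adjust-comment lines.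
import Mathlib
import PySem

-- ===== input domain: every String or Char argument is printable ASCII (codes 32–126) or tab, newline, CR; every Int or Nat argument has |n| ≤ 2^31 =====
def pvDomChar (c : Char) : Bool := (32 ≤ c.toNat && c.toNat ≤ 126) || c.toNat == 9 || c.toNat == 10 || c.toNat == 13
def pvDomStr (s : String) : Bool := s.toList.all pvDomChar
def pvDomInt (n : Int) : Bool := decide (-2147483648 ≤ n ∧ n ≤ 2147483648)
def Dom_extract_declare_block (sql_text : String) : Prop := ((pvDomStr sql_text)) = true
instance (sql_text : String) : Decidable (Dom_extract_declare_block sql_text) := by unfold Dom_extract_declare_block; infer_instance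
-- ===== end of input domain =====

-- B replaces A's two-flag state machine by a flag-free pass: precompute stripped lines,
-- slice at the first heading, pair each line with its predecessor's strip via zip (the
-- look-back replaces previous_was_declare), and emit only the two relevant line kinds
-- (objective: alternative decomposition, same cost).

-- ===== PORT A =====
-- A's loop body as a step function over the state (in_reconstructed_sql, collected, previous_was_declare)
def pvStepA (st : Bool × List String × Bool) (line : String) : Bool × List String × Bool :=
  let (inR, collected, prev) := st
  if !inR then
    if PySem.Str.strip line == "Reconstructed SQL:" then (true, collected, prev)
    else (inR, collected, prev)
  else
    let stripped := PySem.Str.strip line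
    if PySem.Str.startswith stripped "USE " || stripped == "" then (inR, collected, false)
    else if PySem.Str.startswith stripped "DECLARE " then (inR, collected ++ [line], true)
    else if PySem.Str.startswith stripped "-- Adjust the UID declarations below manually" then
      (inR,
        (if !collected.isEmpty && !prev && collected.getLastD "" != "" then collected ++ [""]
         else collected) ++ [line],
        false)
    else (inR, collected, false)

def extract_declare_block (sql_text : String) : List String :=
  let lines := PySem.Str.splitlines sql_text
  let has_reconstructed_heading :=
    lines.any (fun line => PySem.Str.strip line == "Reconstructed SQL:")
  (lines.foldl pvStepA (!has_reconstructed_heading, [], false)).2.1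

-- ===== PORT B =====
-- B's loop body: line paired with the stripped previous line; no state flag
def pvStepB (out : List String) (lp : String × String) : List String :=
  let s := PySem.Str.strip lp.1
  if PySem.Str.startswith s "DECLARE " then out ++ [lp.1]
  else if PySem.Str.startswith s "-- Adjust the UID declarations below manually" then
    (if !out.isEmpty && !PySem.Str.startswith lp.2 "DECLARE " && out.getLastD "" != "" then
       out ++ [""] else out) ++ [lp.1]
  else out

def extract_declare_block_alt (sql_text : String) : List String :=
  let lines := PySem.Str.splitlines sql_text
  let strips := lines.map PySem.Str.strip
  let start := match PySem.List.index? strips "Reconstructed SQL:" with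
    | some i => i + 1
    | none => 0
  let section_ := lines.drop start          -- lines[start:] with 0 ≤ start ≤ len
  let pairs := section_.zip ("" :: strips.drop start)  -- zip truncates like Python's zip
  pairs.foldl pvStepB []

-- ===== PRECONDITION & SPEC =====
def Spec_extract_declare_block (sql_text : String) (out : List String) : Prop := out = extract_declare_block_alt sql_text
instance (sql_text : String) (out : List String) : Decidable (Spec_extract_declare_block sql_text out) := by unfold Spec_extract_declare_block; infer_instance

-- ===== CLAIM (what is proved, stated in full; the proofs are below) =====
def Claim_equal_extract_declare_block : Prop := ∀ (sql_text : String), Dom_extract_declare_block sql_text → Spec_extract_declare_block sql_text (extract_declare_block sql_text)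

-- ===== LEMMAS AND PROOFS =====

-- A's collecting machine over the section, isolated from the heading flag
def pvCollect (section_ : List String) (collected : List String) (prev : Bool) : List String :=
  match section_ with
  | [] => collected
  | line :: rest =>
    let stripped := PySem.Str.strip line
    if PySem.Str.startswith stripped "USE " || stripped == "" then pvCollect rest collected false
    else if PySem.Str.startswith stripped "DECLARE " then pvCollect rest (collected ++ [line]) true
    else if PySem.Str.startswith stripped "-- Adjust the UID declarations below manually" then
      pvCollect rest
        ((if !collected.isEmpty && !prev && collected.getLastD "" != "" then collected ++ [""]
          else collected) ++ [line])
        false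
    else pvCollect rest collected false

theorem foldl_stepA_true (lines collected : List String) (prev : Bool) :
    (lines.foldl pvStepA (true, collected, prev)).2.1 = pvCollect lines collected prev := by
  induction lines generalizing collected prev with
  | nil => rfl
  | cons line rest ih =>
    simp only [List.foldl_cons, pvCollect, pvStepA]
    split_ifs <;> simp_all

theorem foldl_stepA_false (lines collected : List String) (prev : Bool) :
    (lines.foldl pvStepA (false, collected, prev)).2.1 =
      match lines.findIdx? (fun line => PySem.Str.strip line == "Reconstructed SQL:") with
      | some i => pvCollect (lines.drop (i + 1)) collected prev
      | none => collected := by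
  induction lines generalizing collected prev with
  | nil => rfl
  | cons line rest ih =>
    by_cases h : PySem.Str.strip line == "Reconstructed SQL:"
    · simp [List.findIdx?_cons, h, pvStepA, foldl_stepA_true]
    · simp only [List.foldl_cons, List.findIdx?_cons, h, Bool.false_eq_true]
      have : pvStepA (false, collected, prev) line = (false, collected, prev) := by
        simp [pvStepA, h]
      rw [this, ih]
      cases rest.findIdx? (fun line => PySem.Str.strip line == "Reconstructed SQL:") <;> simp

-- prefix-exclusion facts: a line in the USE/blank branch is in neither B-relevant category
theorem use_not_declare (s : String) (h : PySem.Str.startswith s "USE " = true) :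
    PySem.Str.startswith s "DECLARE " = false := by
  simp only [PySem.Str.startswith_eq] at *
  rw [PySem.Chars.startswith_iff] at h
  rw [Bool.eq_false_iff, Ne, PySem.Chars.startswith_iff]
  intro hd
  obtain ⟨t, ht⟩ := h
  obtain ⟨u, hu⟩ := hd
  rw [← ht] at hu
  simp at hu

theorem use_not_comment (s : String) (h : PySem.Str.startswith s "USE " = true) :
    PySem.Str.startswith s "-- Adjust the UID declarations below manually" = false := by
  simp only [PySem.Str.startswith_eq] at *
  rw [PySem.Chars.startswith_iff] at h
  rw [Bool.eq_false_iff, Ne, PySem.Chars.startswith_iff]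
  intro hd
  obtain ⟨t, ht⟩ := h
  obtain ⟨u, hu⟩ := hd
  rw [← ht] at hu
  simp at hu

-- the look-back invariant: A's previous_was_declare flag equals
-- "the stripped previous line starts with DECLARE", so zipping with the
-- predecessor strip (B) simulates the flag (A)
theorem collect_eq_zip (sec : List String) (out : List String) (p : String) :
    pvCollect sec out (PySem.Str.startswith p "DECLARE ") =
      (sec.zip (p :: sec.map PySem.Str.strip)).foldl pvStepB out := by
  induction sec generalizing out p with
  | nil => rfl
  | cons line rest ih =>
    simp only [List.map_cons, List.zip_cons_cons, List.foldl_cons]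
    by_cases h1 : (PySem.Str.startswith (PySem.Str.strip line) "USE " || (PySem.Str.strip line == "")) = true
    · have hd : PySem.Str.startswith (PySem.Str.strip line) "DECLARE " = false := by
        have h1' := h1
        simp only [Bool.or_eq_true] at h1'
        rcases h1' with h | h
        · exact use_not_declare _ h
        · rw [eq_of_beq h]; decide
      have hc : PySem.Str.startswith (PySem.Str.strip line) "-- Adjust the UID declarations below manually" = false := by
        have h1' := h1
        simp only [Bool.or_eq_true] at h1'
        rcases h1' with h | h
        · exact use_not_comment _ h
        · rw [eq_of_beq h]; decide
      have hs : pvStepB out (line, p) = out := by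
        simp only [pvStepB, hd, hc, Bool.false_eq_true, if_false]
      rw [hs]
      show pvCollect (line :: rest) out _ = _
      rw [pvCollect.eq_def]
      simp only [h1, if_true]
      rw [← hd]
      exact ih out (PySem.Str.strip line)
    · rw [pvCollect.eq_def]
      simp only [h1, if_false, Bool.false_eq_true]
      by_cases h2 : PySem.Str.startswith (PySem.Str.strip line) "DECLARE " = true
      · have hs : pvStepB out (line, p) = out ++ [line] := by
          simp only [pvStepB, h2, if_true]
        rw [hs]
        simp only [h2, if_true]
        rw [show true = PySem.Str.startswith (PySem.Str.strip line) "DECLARE " from h2.symm]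
        exact ih _ _
      · by_cases h3 : PySem.Str.startswith (PySem.Str.strip line) "-- Adjust the UID declarations below manually" = true
        · have hs : pvStepB out (line, p) =
            (if !out.isEmpty && !PySem.Str.startswith p "DECLARE " && out.getLastD "" != "" then
               out ++ [""] else out) ++ [line] := by
            simp only [pvStepB, h2, h3, Bool.false_eq_true, if_false, if_true]
          rw [hs]
          simp only [h2, h3, if_true, Bool.false_eq_true, if_false]
          rw [show false = PySem.Str.startswith (PySem.Str.strip line) "DECLARE " from (Bool.eq_false_iff.mpr h2).symm]
          exact ih _ _
        · have hs : pvStepB out (line, p) = out := by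
            simp only [pvStepB, h2, h3, Bool.false_eq_true, if_false]
          rw [hs]
          simp only [h2, h3, Bool.false_eq_true, if_false]
          rw [show false = PySem.Str.startswith (PySem.Str.strip line) "DECLARE " from (Bool.eq_false_iff.mpr h2).symm]
          exact ih _ _

-- B's index? over the stripped lines finds the same position A's heading scan finds
theorem index?_strips (lines : List String) :
    PySem.List.index? (lines.map PySem.Str.strip) "Reconstructed SQL:" =
      lines.findIdx? (fun line => PySem.Str.strip line == "Reconstructed SQL:") := by
  rw [PySem.List.index?_eq_idxOf?]
  simp only [List.idxOf?, List.findIdx?_map]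
  rfl

-- ===== VERDICT (by name: the statement is the Claim_ definition above) =====
theorem extract_declare_block_spec : Claim_equal_extract_declare_block := by
  intro sql_text _
  unfold Spec_extract_declare_block extract_declare_block extract_declare_block_alt
  set lines := PySem.Str.splitlines sql_text with hl
  have hzip : ∀ (start : Nat),
      ((lines.drop start).zip ("" :: (lines.map PySem.Str.strip).drop start)).foldl pvStepB ([] : List String) =
        pvCollect (lines.drop start) [] false := by
    intro start
    rw [← List.map_drop]
    have h0 := collect_eq_zip (lines.drop start) [] ""
    rw [show PySem.Str.startswith "" "DECLARE " = false from by decide] at h0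
    exact h0.symm
  by_cases h : lines.any (fun line => PySem.Str.strip line == "Reconstructed SQL:")
  · have hidx : (lines.findIdx? (fun line => PySem.Str.strip line == "Reconstructed SQL:")).isSome := by
      rw [List.findIdx?_isSome]
      exact h
    obtain ⟨i, hi⟩ := Option.isSome_iff_exists.mp hidx
    simp only [h, Bool.not_true, foldl_stepA_false, hi, index?_strips]
    exact (hzip (i + 1)).symm
  · have hidx : lines.findIdx? (fun line => PySem.Str.strip line == "Reconstructed SQL:") = none := by
      rw [List.findIdx?_eq_none_iff]
      intro x hx
      simpa using fun hc => h (List.any_eq_true.mpr ⟨x, hx, hc⟩)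
    simp only [h, Bool.not_false, foldl_stepA_true, hidx, index?_strips]
    have := hzip 0
    simpa using this.symm
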